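-- pv_equiv track=rewrite | github.com/KrithikK7/Audio_watermarking | embed.py | block_interleave
-- ===== SOURCE A (Python) =====
-- import math
-- from typing import List, Tuple
--
-- def block_interleave(bits: List[int], depth: int) -> List[int]:
--     if depth <= 1: return bits
--     rows = depth; cols = math.ceil(len(bits) / rows)
--     grid = [[0]*cols for _ in range(rows)]; idx = 0
--     for r in range(rows):
--         for c in range(cols):
--             if idx < len(bits):
--                 grid[r][c] = bits[idx]; idx += 1
--     out = []
--     for c in range(cols):
--         for r in range(rows): out.append(grid[r][c])
--     return out[:len(bits)]
-- ===== SOURCE B (Python) =====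
-- import math
--
-- def block_interleave(bits, depth):
--     if depth <= 1:
--         return bits
--     rows = depth
--     cols = math.ceil(len(bits) / rows)
--     n = len(bits)
--     return [bits[(p % rows) * cols + p // rows]
--             if (p % rows) * cols + p // rows < n else 0
--             for p in range(n)]
-- ===== Notes on version B (the rewrite author's own statement) =====
-- stated objective: simpler
-- what changed: B never allocates the rows x cols grid: the column-major read of a row-major fill is produced directly by index arithmetic (src = (p % rows) * cols + p // rows) in a single comprehension over exactly len(bits) output positions, which also makes the truncation and zero-padding implicit.
import Mathlib
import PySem

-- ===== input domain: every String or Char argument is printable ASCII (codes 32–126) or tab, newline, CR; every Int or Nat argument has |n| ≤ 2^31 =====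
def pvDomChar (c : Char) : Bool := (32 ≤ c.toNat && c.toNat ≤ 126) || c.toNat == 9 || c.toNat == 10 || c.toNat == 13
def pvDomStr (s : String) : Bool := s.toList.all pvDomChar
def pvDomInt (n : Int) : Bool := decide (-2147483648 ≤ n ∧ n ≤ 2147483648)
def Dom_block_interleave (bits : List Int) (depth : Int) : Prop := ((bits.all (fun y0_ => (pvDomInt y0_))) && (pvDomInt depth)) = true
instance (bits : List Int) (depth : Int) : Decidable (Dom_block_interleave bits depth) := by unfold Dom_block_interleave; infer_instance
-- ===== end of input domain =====

-- B avoids A's rows×cols grid entirely: the column-major read of the row-major fill is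
-- produced directly by index arithmetic over exactly len(bits) output positions (objective: simpler).

-- ===== PORT A =====
-- math.ceil(len(bits)/rows) is ported as Nat ceiling division (n + rows - 1) / rows; exact on
-- this domain (n, rows ≥ 0 well below 2^52, where float true division rounds to the exact ceil).
def block_interleave (bits : List Int) (depth : Int) : List Int :=
  if depth ≤ 1 then bits
  else
    let n := bits.length
    let rows := depth.toNat
    let cols := (n + rows - 1) / rows
    let fill := (List.range rows).foldl (fun st r =>
        (List.range cols).foldl (fun (st : List (List Int) × Nat) c =>
          if st.2 < n then
            (st.1.set r ((st.1.getD r []).set c (bits.getD st.2 0)), st.2 + 1)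
          else st) st)
      (List.replicate rows (List.replicate cols 0), 0)
    let grid := fill.1
    let out := (List.range cols).foldl (fun out c =>
        (List.range rows).foldl (fun out r =>
          out ++ [(grid.getD r []).getD c 0]) out) []
    out.take n

-- ===== PORT B =====
-- list comprehension over range(len(bits)); Python // and % on nonnegative ints equal Nat / and %.
def block_interleave_alt (bits : List Int) (depth : Int) : List Int :=
  if depth ≤ 1 then bits
  else
    let n := bits.length
    let rows := depth.toNat
    let cols := (n + rows - 1) / rows
    (List.range n).map (fun p =>
      if (p % rows) * cols + p / rows < n then bits.getD ((p % rows) * cols + p / rows) 0 else 0)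

-- ===== PRECONDITION & SPEC =====
def Spec_block_interleave (bits : List Int) (depth : Int) (out : List Int) : Prop := out = block_interleave_alt bits depth
instance (bits : List Int) (depth : Int) (out : List Int) : Decidable (Spec_block_interleave bits depth out) := by unfold Spec_block_interleave; infer_instance

-- ===== CLAIM (what is proved, stated in full; the proofs are below) =====
def Claim_equal_block_interleave : Prop := ∀ (bits : List Int) (depth : Int), Dom_block_interleave bits depth → Spec_block_interleave bits depth (block_interleave bits depth)

-- ===== LEMMAS AND PROOFS =====
theorem pv_set_map_range {α : Type} (k j : Nat) (f : Nat → α) (v : α) (_hj : j < k) :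
    (((List.range k).map f).set j v) = (List.range k).map (fun c => if c = j then v else f c) := by
  apply List.ext_getElem
  · simp
  · intro i hi hi2
    simp only [List.length_set, List.length_map, List.length_range] at hi
    rw [List.getElem_set]
    split <;> simp_all [eq_comm]

theorem pv_flatMap_range {α : Type} (cols rows : Nat) (hrows : 0 < rows) (f : Nat → Nat → α) :
    (List.range cols).flatMap (fun c => (List.range rows).map (f c))
    = (List.range (cols * rows)).map (fun p => f (p / rows) (p % rows)) := by
  induction cols with
  | zero => simp
  | succ c ih =>
    rw [List.range_succ, List.flatMap_append, ih, Nat.succ_mul, List.range_add,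
        List.map_append, List.map_map]
    congr 1
    simp only [List.flatMap_cons, List.flatMap_nil, List.append_nil]
    apply List.map_congr_left
    intro i hi
    simp only [List.mem_range] at hi
    have h1 : (c * rows + i) / rows = c := by
      rw [Nat.add_comm, Nat.add_mul_div_right _ _ hrows, Nat.div_eq_of_lt hi]; omega
    have h2 : (c * rows + i) % rows = i := by
      simp [Nat.add_comm, Nat.mul_comm, Nat.mod_eq_of_lt hi]
    simp [Function.comp, h1, h2]

theorem pv_foldl_append {α β : Type} (xs : List α) (f : α → β) (acc : List β) :
    xs.foldl (fun acc x => acc ++ [f x]) acc = acc ++ xs.map f := by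
  induction xs generalizing acc <;> simp_all

theorem pv_n_le (n rows : Nat) (hrows : 0 < rows) : n ≤ (n + rows - 1) / rows * rows := by
  have h := Nat.div_add_mod (n + rows - 1) rows
  have h2 : (n + rows - 1) % rows < rows := Nat.mod_lt _ hrows
  generalize hq : (n + rows - 1) / rows = q at *
  rw [Nat.mul_comm] at h
  generalize q * rows = m at *
  omega

def pvVal (bits : List Int) (s : Nat) : Int :=
  if s < bits.length then bits.getD s 0 else 0

theorem pv_getD_map_range {α : Type} (k i : Nat) (f : Nat → α) (d : α) :
    ((List.range k).map f).getD i d = if i < k then f i else d := by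
  rcases Nat.lt_or_ge i k with h | h
  · simp [List.getD, h]
  · rw [List.getD_eq_default] <;> simp [h, Nat.not_lt.2 h]

theorem pv_inner (bits : List Int) (n cols r : Nat) (hn : n = bits.length) :
    ∀ (j : Nat) (g : List (List Int)) (base : Nat), j ≤ cols → r < g.length →
      g.getD r [] = List.replicate cols 0 →
      (List.range j).foldl (fun (st : List (List Int) × Nat) c =>
          if st.2 < n then
            (st.1.set r ((st.1.getD r []).set c (bits.getD st.2 0)), st.2 + 1)
          else st) (g, min n base)
      = (g.set r ((List.range cols).map (fun c => if c < j then pvVal bits (base + c) else 0)),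
         min n (base + j)) := by
  intro j
  induction j with
  | zero =>
    intro g base _ hr hg
    have h0 : ((List.range cols).map (fun c => if c < 0 then pvVal bits (base + c) else 0))
        = List.replicate cols 0 := by
      simp
    rw [h0, ← hg, List.getD_eq_getElem g [] hr]
    simp [List.set_getElem_self]
  | succ j ih =>
    intro g base hj hr hg
    have hj' : j < cols := hj
    rw [List.range_succ, List.foldl_append, ih g base (le_of_lt hj') hr hg]
    simp only [List.foldl_cons, List.foldl_nil]
    have hgd : ((g.set r ((List.range cols).map (fun c => if c < j then pvVal bits (base + c) else 0))).getD r [])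
        = (List.range cols).map (fun c => if c < j then pvVal bits (base + c) else 0) := by
      rw [List.getD_eq_getElem _ [] (by simpa using hr)]
      simp [List.getElem_set_self]
    by_cases hlt : base + j < n
    · have hmin : min n (base + j) = base + j := by omega
      simp only [hmin, if_pos hlt, hgd, List.set_set]
      rw [pv_set_map_range cols j _ _ hj', Prod.mk.injEq]
      refine ⟨?_, by omega⟩
      congr 1
      apply List.map_congr_left
      intro c hc
      by_cases h1 : c = j
      · have hb : base + j < bits.length := hn ▸ hlt
        simp [h1, pvVal, hb]
      · by_cases h2 : c < j <;> simp [h1, h2] <;> omega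
    · have hmin : min n (base + j) = n := by omega
      rw [hmin, if_neg (by omega), Prod.mk.injEq]
      refine ⟨?_, by omega⟩
      congr 1
      apply List.map_congr_left
      intro c hc
      by_cases h1 : c = j
      · simp [pvVal]; omega
      · by_cases h2 : c < j <;> simp [h2] <;> omega

theorem pv_outer (bits : List Int) (n rows cols : Nat) (hn : n = bits.length) :
    ∀ (k : Nat), k ≤ rows →
      (List.range k).foldl (fun st r =>
        (List.range cols).foldl (fun (st : List (List Int) × Nat) c =>
          if st.2 < n then
            (st.1.set r ((st.1.getD r []).set c (bits.getD st.2 0)), st.2 + 1)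
          else st) st)
        (List.replicate rows (List.replicate cols 0), 0)
      = ((List.range rows).map (fun r =>
            if r < k then (List.range cols).map (fun c => pvVal bits (r * cols + c))
            else List.replicate cols 0),
         min n (k * cols)) := by
  intro k
  induction k with
  | zero =>
    intro _
    simp
  | succ k ih =>
    intro hk
    have hk' : k < rows := hk
    rw [List.range_succ, List.foldl_append, ih (le_of_lt hk')]
    simp only [List.foldl_cons, List.foldl_nil]
    have hlen : k < ((List.range rows).map (fun r =>
        if r < k then (List.range cols).map (fun c => pvVal bits (r * cols + c))
        else List.replicate cols 0)).length := by simpa using hk'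
    have hgd : (((List.range rows).map (fun r =>
        if r < k then (List.range cols).map (fun c => pvVal bits (r * cols + c))
        else List.replicate cols 0)).getD k []) = List.replicate cols 0 := by
      rw [pv_getD_map_range]
      simp [hk']
    rw [show (min n (k * cols)) = min n (k * cols) from rfl]
    rw [pv_inner bits n cols k hn cols _ (k * cols) (le_refl cols) hlen hgd]
    rw [pv_set_map_range rows k _ _ hk', Prod.mk.injEq]
    constructor
    · apply List.map_congr_left
      intro r hr
      by_cases h1 : r = k
      · simp only [h1, Nat.lt_succ_self, if_true]
        apply List.map_congr_left
        intro c hc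
        simp only [List.mem_range] at hc
        simp [hc]
      · by_cases h2 : r < k <;> simp [h1, h2] <;> omega
    · rw [Nat.succ_mul]

theorem pv_out_fold {α : Type} (rows : Nat) (xs : List Nat) (h : Nat → Nat → α) (acc : List α) :
    xs.foldl (fun out c => (List.range rows).foldl (fun out r => out ++ [h c r]) out) acc
    = acc ++ xs.flatMap (fun c => (List.range rows).map (h c)) := by
  induction xs generalizing acc with
  | nil => simp
  | cons x xs ih => rw [List.foldl_cons, pv_foldl_append, ih, List.flatMap_cons, List.append_assoc]

theorem pv_main (bits : List Int) (depth : Int) :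
    block_interleave bits depth = block_interleave_alt bits depth := by
  by_cases hd : depth ≤ 1
  · simp [block_interleave, block_interleave_alt, hd]
  · simp only [block_interleave, block_interleave_alt, if_neg hd]
    have hrows : 0 < depth.toNat := by omega
    set n := bits.length with hn
    set rows := depth.toNat with hrw
    set cols := (n + rows - 1) / rows with hcols
    rw [pv_outer bits n rows cols hn rows (le_refl rows)]
    rw [pv_out_fold, List.nil_append]
    have hgrid : ∀ c ∈ List.range cols, ∀ r ∈ List.range rows,
        (((List.range rows).map (fun r =>
            if r < rows then (List.range cols).map (fun c => pvVal bits (r * cols + c))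
            else List.replicate cols 0)).getD r []).getD c 0 = pvVal bits (r * cols + c) := by
      intro c hc r hr
      simp only [List.mem_range] at hc hr
      rw [pv_getD_map_range, if_pos hr, if_pos hr, pv_getD_map_range, if_pos hc]
    have hcongr : (List.range cols).flatMap (fun c => (List.range rows).map (fun r =>
        (((List.range rows).map (fun r =>
            if r < rows then (List.range cols).map (fun c => pvVal bits (r * cols + c))
            else List.replicate cols 0)).getD r []).getD c 0))
      = (List.range cols).flatMap (fun c => (List.range rows).map (fun r => pvVal bits (r * cols + c))) := by
      apply List.flatMap_congr
      intro c hc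
      apply List.map_congr_left
      intro r hr
      exact hgrid c hc r hr
    rw [hcongr, pv_flatMap_range cols rows hrows, ← List.map_take, List.take_range,
        Nat.min_eq_left (pv_n_le n rows hrows)]
    apply List.map_congr_left
    intro p hp
    simp [pvVal, hn]

-- ===== VERDICT (by name: the statement is the Claim_ definition above) =====
theorem block_interleave_spec : Claim_equal_block_interleave := by
  intro bits depth _
  unfold Spec_block_interleave
  exact pv_main bits depth
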